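-- pv_equiv track=rewrite | github.com/doron04/dsf | block_1/solutions.py | sum_tuple_x
-- ===== SOURCE A (Python) =====
-- def sum_tuple_x(tup1, tup2):
--     """
--     Given two lists of tuples of (x, y) this function sums the y-values of
--     across all x-values and returns the output in a dictionary.
--     """
--
--     # collect all tuple values in one larger list
--     tuple_values = []
--     for tup_list in [tup1, tup2]:
--
--         tuple_values += [tup for tup in tup_list]
--
--     # create empty dict
--     output = {}
--
--     # iterate through tuple_values
--     for x, y in tuple_values:
--
--         # check if entry exists and append dict
--         if x in output.keys():
--             output[x] += y
--         else:
--             output[x] = y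
--
--     return output
-- ===== SOURCE B (Python) =====
-- def sum_tuple_x(tup1, tup2):
--     """
--     Sum the y-values per x-value across both tuple lists, returned as a dict.
--     Partition strategy: repeatedly take the first remaining x, total its
--     y-values over the whole remaining list, then drop all pairs with that x.
--     """
--     pairs = list(tup1) + list(tup2)
--     output = {}
--     while pairs:
--         x = pairs[0][0]
--         output[x] = sum(y for k, y in pairs if k == x)
--         pairs = [p for p in pairs if p[0] != x]
--     return output
-- ===== Notes on version B (the rewrite author's own statement) =====
-- stated objective: alternative
-- what changed: Replaces A's single-pass dict accumulation (membership test + in-place add per pair) with a partition loop: repeatedly take the first remaining x-key, sum all its y-values over the remaining pair list in one go, and filter those pairs out.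
import Mathlib
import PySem

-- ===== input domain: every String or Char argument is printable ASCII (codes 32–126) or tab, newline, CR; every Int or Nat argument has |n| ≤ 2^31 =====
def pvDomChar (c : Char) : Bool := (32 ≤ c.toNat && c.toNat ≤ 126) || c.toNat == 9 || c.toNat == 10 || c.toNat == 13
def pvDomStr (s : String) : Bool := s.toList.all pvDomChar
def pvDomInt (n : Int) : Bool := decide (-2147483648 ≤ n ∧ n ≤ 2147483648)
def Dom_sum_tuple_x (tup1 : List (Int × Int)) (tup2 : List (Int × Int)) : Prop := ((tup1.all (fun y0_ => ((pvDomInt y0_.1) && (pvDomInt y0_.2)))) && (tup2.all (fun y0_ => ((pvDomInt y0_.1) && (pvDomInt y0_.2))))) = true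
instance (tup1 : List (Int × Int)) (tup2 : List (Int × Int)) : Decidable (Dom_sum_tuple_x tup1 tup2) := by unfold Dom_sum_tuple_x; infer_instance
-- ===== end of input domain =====

-- ===== PORT A =====
-- B differs from A by strategy (first-key partition loop instead of a dict accumulated
-- pair by pair); objective: alternative — same results, different traversal, no speed claim.
def sum_tuple_x (tup1 : List (Int × Int)) (tup2 : List (Int × Int)) : List (Int × Int) :=
  -- tuple_values = []; for tup_list in [tup1, tup2]: tuple_values += [tup for tup in tup_list]
  let tuple_values : List (Int × Int) :=
    [tup1, tup2].foldl (fun acc tup_list => acc ++ tup_list.map (fun tup => tup)) []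
  -- output = {}; for x, y in tuple_values: if x in output.keys(): output[x] += y else: output[x] = y
  let output : PySem.Dict Int Int :=
    tuple_values.foldl
      (fun d p => if d.contains p.1 then d.modify p.1 0 (· + p.2) else d.insert p.1 p.2)
      PySem.Dict.empty
  output.items

-- ===== PORT B =====
-- while pairs: x = pairs[0][0]; output[x] = sum(y for k, y in pairs if k == x);
--              pairs = [p for p in pairs if p[0] != x]
-- (each loop iteration appends a fresh key, so the dict is a plain list of the emitted pairs)
def pvAltGo : List (Int × Int) → List (Int × Int)
  | [] => []
  | p0 :: rest =>
      (p0.1, (((p0 :: rest).filter (fun q => q.1 = p0.1)).map (fun q => q.2)).sum) ::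
        pvAltGo ((p0 :: rest).filter (fun q => q.1 ≠ p0.1))
termination_by l => l.length
decreasing_by
  have h : ((p0 :: rest).filter (fun q => q.1 ≠ p0.1)).length ≤ rest.length := by
    rw [List.filter_cons]
    simp only [ne_eq, not_true_eq_false, decide_false, Bool.false_eq_true, if_false]
    exact List.length_filter_le _ _
  simpa using Nat.lt_succ_of_le h

def sum_tuple_x_alt (tup1 : List (Int × Int)) (tup2 : List (Int × Int)) : List (Int × Int) :=
  pvAltGo (tup1 ++ tup2)

-- ===== PRECONDITION & SPEC =====
def Spec_sum_tuple_x (tup1 : List (Int × Int)) (tup2 : List (Int × Int)) (out : List (Int × Int)) : Prop := out = sum_tuple_x_alt tup1 tup2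
instance (tup1 : List (Int × Int)) (tup2 : List (Int × Int)) (out : List (Int × Int)) : Decidable (Spec_sum_tuple_x tup1 tup2 out) := by unfold Spec_sum_tuple_x; infer_instance

-- ===== CLAIM (what is proved, stated in full; the proofs are below) =====
def Claim_equal_sum_tuple_x : Prop := ∀ (tup1 : List (Int × Int)) (tup2 : List (Int × Int)), Dom_sum_tuple_x tup1 tup2 → Spec_sum_tuple_x tup1 tup2 (sum_tuple_x tup1 tup2)

-- ===== LEMMAS AND PROOFS =====

-- key membership in a plain items list (mirrors Dict.contains)
def pvKeyMem (x : Int) (items : List (Int × Int)) : Bool := items.any (fun q => q.1 == x)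

-- pure-list model of one iteration of A's dict-accumulation loop
def pvStepM (items : List (Int × Int)) (p : Int × Int) : List (Int × Int) :=
  if pvKeyMem p.1 items then
    items.map (fun q => if q.1 = p.1 then (q.1, q.2 + p.2) else q)
  else items ++ [p]

-- total y-value of key x in l
def pvSumY (x : Int) (l : List (Int × Int)) : Int :=
  ((l.filter (fun q => q.1 = x)).map (fun q => q.2)).sum

lemma pvSumY_nil (x : Int) : pvSumY x [] = 0 := rfl

lemma pvSumY_cons (x k y : Int) (t : List (Int × Int)) :
    pvSumY x ((k, y) :: t) = (if k = x then y else 0) + pvSumY x t := by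
  simp only [pvSumY, List.filter_cons]
  by_cases h : k = x <;> simp [h]

lemma pvSumY_filter (x : Int) (t : List (Int × Int)) (q : Int × Int → Bool)
    (h : ∀ p ∈ t, p.1 = x → q p = true) :
    pvSumY x (t.filter q) = pvSumY x t := by
  induction t with
  | nil => rfl
  | cons p t ih =>
    rcases p with ⟨k, y⟩
    have iht := ih (fun p hp => h p (List.mem_cons_of_mem _ hp))
    rw [List.filter_cons]
    by_cases hq : q (k, y) = true
    · simp [hq, pvSumY_cons, iht]
    · have hk : ¬ k = x := fun hk => hq (h _ List.mem_cons_self hk)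
      simp [hq, pvSumY_cons, hk, iht]

lemma pvKeyMem_false_ne (x : Int) (items : List (Int × Int))
    (h : pvKeyMem x items = false) : ∀ q ∈ items, q.1 ≠ x := by
  intro q hq
  simp only [pvKeyMem, List.any_eq_false, beq_iff_eq] at h
  exact h q hq

-- value looked up by A's dict equals the unique entry's value (needs nodup keys)
lemma pvGetD_of_mem (items : List (Int × Int)) (q : Int × Int)
    (hnd : (items.map Prod.fst).Nodup) (hq : q ∈ items) :
    (PySem.Dict.mk items).getD q.1 0 = q.2 := by
  induction items with
  | nil => cases hq
  | cons p t ih =>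
    rcases p with ⟨a, b⟩
    simp only [List.map_cons, List.nodup_cons] at hnd
    rcases List.mem_cons.mp hq with h | h
    · subst h
      simp [PySem.Dict.getD, PySem.Dict.get?_mk_cons]
    · have hne : a ≠ q.1 := fun he => hnd.1 (he ▸ List.mem_map.mpr ⟨q, h, rfl⟩)
      simp only [PySem.Dict.getD, PySem.Dict.get?_mk_cons, beq_iff_eq, hne, if_false]
      exact ih hnd.2 h

-- one step of A's dict loop is pvStepM on the items list
lemma pvStepA_items (items : List (Int × Int)) (p : Int × Int)
    (hnd : (items.map Prod.fst).Nodup) :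
    ((if (PySem.Dict.mk items).contains p.1 then
        (PySem.Dict.mk items).modify p.1 0 (· + p.2)
      else (PySem.Dict.mk items).insert p.1 p.2) : PySem.Dict Int Int).items
      = pvStepM items p := by
  have hc : (PySem.Dict.mk items).contains p.1 = pvKeyMem p.1 items := rfl
  by_cases h : pvKeyMem p.1 items = true
  · rw [pvStepM, if_pos h]
    simp only [hc, h, if_true, PySem.Dict.modify, PySem.Dict.insert]
    apply List.map_congr_left
    intro q hq
    by_cases he : q.1 = p.1
    · simp only [beq_iff_eq, he, if_true]
      have := pvGetD_of_mem items q hnd hq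
      rw [he] at this
      rw [this]
    · simp [he]
  · rw [pvStepM, if_neg h]
    simp only [hc, h, Bool.false_eq_true, if_false, PySem.Dict.insert]

lemma pvStepM_keys (items : List (Int × Int)) (p : Int × Int) :
    (pvStepM items p).map Prod.fst
      = if pvKeyMem p.1 items then items.map Prod.fst else items.map Prod.fst ++ [p.1] := by
  unfold pvStepM
  by_cases h : pvKeyMem p.1 items = true
  · simp only [h, if_true, List.map_map]
    apply List.map_congr_left
    intro q _
    by_cases he : q.1 = p.1 <;> simp [he]
  · simp [h]

lemma pvStepM_nodup (items : List (Int × Int)) (p : Int × Int)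
    (hnd : (items.map Prod.fst).Nodup) : ((pvStepM items p).map Prod.fst).Nodup := by
  rw [pvStepM_keys]
  by_cases h : pvKeyMem p.1 items = true
  · simpa [h]
  · simp only [h, Bool.false_eq_true, if_false]
    refine List.Nodup.append hnd (List.nodup_singleton _) ?_
    intro a ha hb
    rcases List.mem_singleton.mp hb with rfl
    rcases List.mem_map.mp ha with ⟨q, hq, hq1⟩
    exact pvKeyMem_false_ne _ _ (by simpa using h) q hq hq1

-- A's whole dict loop, modelled on the items list
lemma pvFoldA_items (l : List (Int × Int)) :
    ∀ items : List (Int × Int), (items.map Prod.fst).Nodup →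
    (l.foldl (fun d p => if d.contains p.1 then d.modify p.1 0 (· + p.2)
                         else d.insert p.1 p.2) (PySem.Dict.mk items)).items
      = l.foldl pvStepM items := by
  induction l with
  | nil => intro items _; rfl
  | cons p t ih =>
    intro items hnd
    have h1 := pvStepA_items items p hnd
    have : (if (PySem.Dict.mk items).contains p.1 then
              (PySem.Dict.mk items).modify p.1 0 (· + p.2)
            else (PySem.Dict.mk items).insert p.1 p.2)
            = PySem.Dict.mk (pvStepM items p) := by
      cases hd : (if (PySem.Dict.mk items).contains p.1 then
              (PySem.Dict.mk items).modify p.1 0 (· + p.2)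
            else (PySem.Dict.mk items).insert p.1 p.2)
      rw [hd] at h1
      simpa using (congrArg PySem.Dict.mk h1.symm).symm
    simp only [List.foldl_cons, this]
    exact ih _ (pvStepM_nodup items p hnd)

lemma pvAltGo_nil : pvAltGo [] = [] := by rw [pvAltGo]

lemma pvAltGo_cons (p0 : Int × Int) (rest : List (Int × Int)) :
    pvAltGo (p0 :: rest)
      = (p0.1, pvSumY p0.1 (p0 :: rest)) :: pvAltGo ((p0 :: rest).filter (fun q => q.1 ≠ p0.1)) := by
  rw [pvAltGo]
  rfl

-- the model loop computes: old entries with their sums added, then B's loop on the fresh keys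
lemma pvFoldM_eq (l : List (Int × Int)) :
    ∀ items : List (Int × Int), (items.map Prod.fst).Nodup →
    l.foldl pvStepM items
      = items.map (fun q => (q.1, q.2 + pvSumY q.1 l))
          ++ pvAltGo (l.filter (fun p => ¬ pvKeyMem p.1 items)) := by
  induction l with
  | nil =>
    intro items _
    simp [pvSumY_nil, pvAltGo_nil]
  | cons p t ih =>
    intro items hnd
    rcases p with ⟨x, y⟩
    simp only [List.foldl_cons]
    rw [ih (pvStepM items (x, y)) (pvStepM_nodup items _ hnd)]
    by_cases h : pvKeyMem x items = true
    · -- key already present: entry updated in place, pair filtered out of B's tail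
      have hfilter : ((x, y) :: t).filter (fun p => ¬ pvKeyMem p.1 items)
          = t.filter (fun p => ¬ pvKeyMem p.1 items) := by
        simp [h]
      have hkeys : ∀ p : Int × Int, pvKeyMem p.1 (pvStepM items (x, y)) = pvKeyMem p.1 items := by
        intro p
        simp only [pvKeyMem]
        rw [Bool.eq_iff_iff]
        simp only [List.any_eq_true]
        constructor
        · rintro ⟨q, hq, hb⟩
          unfold pvStepM at hq
          rw [if_pos (by exact h)] at hq
          rcases List.mem_map.mp hq with ⟨r, hr, hrq⟩
          by_cases he : r.1 = x
          · refine ⟨r, hr, ?_⟩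
            simp only [he, if_true] at hrq
            rw [← hrq] at hb
            simpa [he] using hb
          · simp only [he, if_false] at hrq
            exact ⟨r, hr, hrq ▸ hb⟩
        · rintro ⟨q, hq, hb⟩
          unfold pvStepM
          rw [if_pos (by exact h)]
          by_cases he : q.1 = x
          · exact ⟨(q.1, q.2 + y), List.mem_map.mpr ⟨q, hq, by simp [he]⟩, hb⟩
          · exact ⟨q, List.mem_map.mpr ⟨q, hq, by simp [he]⟩, hb⟩
      have hmap : (pvStepM items (x, y)).map (fun q => (q.1, q.2 + pvSumY q.1 t))
          = items.map (fun q => (q.1, q.2 + pvSumY q.1 ((x, y) :: t))) := by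
        unfold pvStepM
        rw [if_pos (by exact h)]
        rw [List.map_map]
        apply List.map_congr_left
        intro q _
        by_cases he : q.1 = x
        · simp only [Function.comp_apply, he, if_true, pvSumY_cons]
          simp [add_assoc]
        · have hne' : ¬ x = q.1 := fun hh => he hh.symm
          simp only [Function.comp_apply, he, if_false, pvSumY_cons]
          simp [hne']
      have hfiltM : t.filter (fun p => ¬ pvKeyMem p.1 (pvStepM items (x, y)))
          = t.filter (fun p => ¬ pvKeyMem p.1 items) :=
        List.filter_congr (fun p _ => by simp [hkeys p])
      rw [hmap, hfiltM, hfilter]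
    · -- fresh key: appended to the dict, opens a new group in B's loop
      have hne := pvKeyMem_false_ne x items (by simpa using h)
      have hstep : pvStepM items (x, y) = items ++ [(x, y)] := by
        unfold pvStepM; simp [h]
      have hfilter : ((x, y) :: t).filter (fun p => ¬ pvKeyMem p.1 items)
          = (x, y) :: t.filter (fun p => ¬ pvKeyMem p.1 items) := by
        simp [h]
      rw [hstep, hfilter, pvAltGo_cons]
      have hsum : pvSumY x ((x, y) :: t.filter (fun p => ¬ pvKeyMem p.1 items))
          = y + pvSumY x t := by
        rw [pvSumY_cons, if_pos rfl]
        congr 1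
        exact pvSumY_filter x t _ (fun p hp hpx => by simp [hpx, h])
      have hfilter2 :
          (((x, y) :: t.filter (fun p => ¬ pvKeyMem p.1 items)).filter (fun q => q.1 ≠ x))
            = t.filter (fun p => ¬ pvKeyMem p.1 (items ++ [(x, y)])) := by
        rw [List.filter_cons]
        simp only [ne_eq, not_true_eq_false, decide_false, Bool.false_eq_true, if_false]
        rw [List.filter_filter]
        apply List.filter_congr
        intro p _
        simp only [pvKeyMem, List.any_append, List.any_cons, List.any_nil, Bool.or_false]
        by_cases hpx : p.1 = x
        · simp [hpx]
        · simp only [hpx, decide_false]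
          simp [hpx]
          intro _
          exact fun hh => hpx hh.symm
      have hmap2 : (items ++ [(x, y)]).map (fun q => (q.1, q.2 + pvSumY q.1 t))
          = items.map (fun q => (q.1, q.2 + pvSumY q.1 ((x, y) :: t))) ++ [(x, y + pvSumY x t)] := by
        rw [List.map_append]
        congr 1
        apply List.map_congr_left
        intro q hq
        rw [pvSumY_cons, if_neg (fun hh => hne q hq hh.symm)]
        simp
      rw [hmap2, hsum, hfilter2]
      simp

-- ===== VERDICT (by name: the statement is the Claim_ definition above) =====
theorem sum_tuple_x_spec : Claim_equal_sum_tuple_x := by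
  intro tup1 tup2 _
  show sum_tuple_x tup1 tup2 = sum_tuple_x_alt tup1 tup2
  unfold sum_tuple_x sum_tuple_x_alt
  simp only [List.foldl_cons, List.foldl_nil, List.map_id_fun', List.nil_append]
  have h0 : (PySem.Dict.empty : PySem.Dict Int Int) = PySem.Dict.mk [] := rfl
  rw [h0, pvFoldA_items _ [] (by simp), pvFoldM_eq _ [] (by simp)]
  simp [pvKeyMem]
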